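-- pv_equiv track=rewrite | github.com/miliar/Code_Jam_Webscraper | Solutions_python/Problem_178/2041.py | make_mutable
-- ===== SOURCE A (Python) =====
-- def make_mutable(s):
-- 	arr = []
-- 	last = None
-- 	value = None
-- 	for c in s:
-- 		if (c == '+'):
-- 			value = 1
-- 		else:
-- 			value = 0
-- 		if (value == last):
-- 			arr[-1][1] += 1
-- 		else:
-- 			arr.append([value, 1])
-- 			last = value
-- 	return arr
-- ===== SOURCE B (Python) =====
-- def make_mutable(s):
--     vals = [1 if c == '+' else 0 for c in s]
--     out = []
--     i = 0
--     n = len(vals)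
--     while i < n:
--         j = i
--         while j < n and vals[j] == vals[i]:
--             j += 1
--         out.append([vals[i], j - i])
--         i = j
--     return out
-- ===== Notes on version B (the rewrite author's own statement) =====
-- stated objective: alternative
-- what changed: B maps the string to 0/1 values once, then emits maximal runs with a two-pointer scan (append [value, run length] per run), instead of A's per-character state machine that tracks the previous value and mutates arr[-1][1] in place.
import Mathlib
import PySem

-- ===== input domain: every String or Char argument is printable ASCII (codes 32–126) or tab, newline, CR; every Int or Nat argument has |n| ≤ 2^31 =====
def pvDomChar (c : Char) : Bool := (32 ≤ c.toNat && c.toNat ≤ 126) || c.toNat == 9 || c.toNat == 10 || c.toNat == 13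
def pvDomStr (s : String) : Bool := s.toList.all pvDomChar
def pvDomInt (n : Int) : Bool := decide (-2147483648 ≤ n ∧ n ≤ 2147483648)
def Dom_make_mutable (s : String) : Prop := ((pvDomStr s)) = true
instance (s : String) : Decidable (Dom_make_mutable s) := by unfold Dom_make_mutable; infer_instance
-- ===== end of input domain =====

-- B emits runs by a two-pointer scan over a premapped 0/1 list instead of A's
-- last-value state machine with in-place increment of arr[-1][1]; same cost, different structure.


-- ===== PORT A =====
-- arr[-1][1] += 1 : increment the second entry of the last row (the rows A builds are [v, k])
def pvBumpLast (arr : List (List Int)) : List (List Int) :=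
  match arr with
  | [] => []
  | [r] => [match r with | [a, b] => [a, b + 1] | r => r]
  | x :: xs => x :: pvBumpLast xs

def pvStepA (st : List (List Int) × Option Int) (c : Char) : List (List Int) × Option Int :=
  let value : Int := if c = '+' then 1 else 0
  if some value = st.2 then (pvBumpLast st.1, st.2)
  else (st.1 ++ [[value, 1]], some value)

def make_mutable (s : String) : List (List Int) :=
  (s.toList.foldl pvStepA ([], none)).1

-- ===== PORT B =====
-- inner while: count how long the run of v continues, return (count, rest)
def pvTakeRun (v : Int) : List Int → Nat × List Int
  | [] => (0, [])
  | x :: xs =>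
    if x = v then
      let (n, r) := pvTakeRun v xs
      (n + 1, r)
    else (0, x :: xs)

theorem pvTakeRun_len (v : Int) : ∀ xs : List Int, (pvTakeRun v xs).2.length ≤ xs.length := by
  intro xs
  induction xs with
  | nil => simp [pvTakeRun]
  | cons x xs ih =>
    simp only [pvTakeRun]
    split
    · simpa using Nat.le_succ_of_le ih
    · simp

-- outer while: emit [v, run length] per maximal run
def pvRuns : List Int → List (List Int)
  | [] => []
  | v :: xs =>
    let p := pvTakeRun v xs
    [v, (p.1 : Int) + 1] :: pvRuns p.2
termination_by xs => xs.length
decreasing_by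
  simpa using Nat.lt_succ_of_le (pvTakeRun_len v xs)

def make_mutable_alt (s : String) : List (List Int) :=
  pvRuns (s.toList.map (fun c => if c = '+' then 1 else 0))

-- ===== PRECONDITION & SPEC =====
def Spec_make_mutable (s : String) (out : List (List Int)) : Prop := out = make_mutable_alt s
instance (s : String) (out : List (List Int)) : Decidable (Spec_make_mutable s out) := by unfold Spec_make_mutable; infer_instance

-- ===== CLAIM (what is proved, stated in full; the proofs are below) =====
def Claim_equal_make_mutable : Prop := ∀ (s : String), Dom_make_mutable s → Spec_make_mutable s (make_mutable s)

-- ===== LEMMAS AND PROOFS =====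

theorem pvBumpLast_append (arr : List (List Int)) (v k : Int) :
    pvBumpLast (arr ++ [[v, k]]) = arr ++ [[v, k + 1]] := by
  induction arr with
  | nil => simp [pvBumpLast]
  | cons x xs ih =>
    cases xs with
    | nil => simp [pvBumpLast]
    | cons y ys => simpa [pvBumpLast] using ih

-- A's fold over the values instead of the chars
theorem foldA_map (cs : List Char) (st : List (List Int) × Option Int) :
    cs.foldl pvStepA st =
      (cs.map (fun c => if c = '+' then (1:Int) else 0)).foldl
        (fun st v => if some v = st.2 then (pvBumpLast st.1, st.2) else (st.1 ++ [[v, 1]], some v)) st := by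
  induction cs generalizing st with
  | nil => rfl
  | cons c cs ih => simp only [List.foldl, List.map]; rw [ih]; rfl

-- runs continued from an open run [v, k]
def pvRunsAux (v : Int) (k : Int) (xs : List Int) : List (List Int) :=
  let p := pvTakeRun v xs
  [v, k + (p.1 : Int)] :: pvRuns p.2

theorem foldA_invariant (xs : List Int) : ∀ (arr : List (List Int)) (v k : Int),
    (xs.foldl (fun st w => if some w = st.2 then (pvBumpLast st.1, st.2) else (st.1 ++ [[w, 1]], some w))
        (arr ++ [[v, k]], some v)).1 = arr ++ pvRunsAux v k xs := by
  induction xs with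
  | nil => intro arr v k; simp [pvRunsAux, pvTakeRun, pvRuns]
  | cons x xs ih =>
    intro arr v k
    simp only [List.foldl]
    by_cases hx : x = v
    · subst hx
      rw [if_pos rfl, pvBumpLast_append, ih arr x (k + 1)]
      simp only [pvRunsAux, pvTakeRun]
      congr 3
      push_cast
      ring_nf
    · rw [if_neg (by simp [hx]), ih (arr ++ [[v, k]]) x 1]
      simp only [pvRunsAux, pvTakeRun, if_neg hx, pvRuns, List.append_assoc, List.cons_append,
        List.nil_append]
      push_cast
      ring_nf

theorem make_mutable_eq (s : String) : make_mutable s = make_mutable_alt s := by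
  unfold make_mutable make_mutable_alt
  rw [foldA_map]
  cases h : s.toList.map (fun c => if c = '+' then (1:Int) else 0) with
  | nil => simp [pvRuns]
  | cons v xs =>
    simp only [List.foldl]
    rw [if_neg (by simp), show ([] : List (List Int)) ++ [[v, 1]] = [] ++ [[v, 1]] from rfl,
      foldA_invariant xs [] v 1]
    simp only [pvRuns, pvRunsAux, List.nil_append]
    congr 3
    ring

-- ===== VERDICT (by name: the statement is the Claim_ definition above) =====
theorem make_mutable_spec : Claim_equal_make_mutable := by
  intro s _
  exact make_mutable_eq s
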